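-- pv_equiv track=rewrite | github.com/jinhoDevOps/NCUC-Nekmucheol | makePersona.py | extract_event_result_part
-- ===== SOURCE A (Python) =====
-- def extract_event_result_part(text):
--     lines = text.strip().split("\n")
--     event_result_part = []
--     capture = False
--
--     for line in lines:
--         if line.startswith("event:result"):
--             capture = True
--         if capture:
--             event_result_part.append(line)
--
--     return "\n".join(event_result_part)
-- ===== SOURCE B (Python) =====
-- def extract_event_result_part(text):
--     lines = text.strip().split("\n")
--     tail = None
--     res = None
--     for line in reversed(lines):
--         tail = line if tail is None else line + "\n" + tail
--         if line.startswith("event:result"):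
--             res = tail
--     return res if res is not None else ""
-- ===== Notes on version B (the rewrite author's own statement) =====
-- stated objective: alternative
-- what changed: Replaces A's forward flag-loop that collects matching lines into a list and joins them with a single backward pass that builds the joined suffix string back-to-front and snapshots it at each marker line, so the final snapshot (first marker in text order) is the answer with no flag, no collected list and no final join.
import Mathlib
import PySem

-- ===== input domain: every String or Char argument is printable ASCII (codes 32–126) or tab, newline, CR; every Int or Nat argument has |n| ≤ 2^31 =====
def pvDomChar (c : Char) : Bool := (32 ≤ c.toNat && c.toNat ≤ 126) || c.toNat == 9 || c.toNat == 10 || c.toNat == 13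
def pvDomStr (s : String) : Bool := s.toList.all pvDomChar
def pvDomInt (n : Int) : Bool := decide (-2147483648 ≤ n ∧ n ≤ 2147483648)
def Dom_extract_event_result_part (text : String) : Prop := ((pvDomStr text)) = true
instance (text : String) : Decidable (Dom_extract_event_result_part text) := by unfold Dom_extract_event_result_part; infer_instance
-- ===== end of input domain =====

-- B replaces A's forward flag-loop (collect matching lines into a list, join at the end) with a single
-- backward pass that builds the joined suffix string back-to-front and snapshots it at each marker line;
-- the final snapshot (first marker in text order) is the answer. Alternative decomposition, same cost class.

-- ===== PORT A =====
-- A's loop body: set the flag on a matching line, append while the flag is set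
def pvCaptureStep (st : List String × Bool) (line : String) : List String × Bool :=
  let capture := if PySem.Str.startswith line "event:result" then true else st.2
  let part := if capture then st.1 ++ [line] else st.1
  (part, capture)

def extract_event_result_part (text : String) : String :=
  let lines := (PySem.Str.split? (PySem.Str.strip text) "\n").getD []
  let st := lines.foldl pvCaptureStep ([], false)
  PySem.Str.join "\n" st.1

-- ===== PORT B =====
-- B's loop body over reversed(lines): extend the joined tail string, snapshot it on a marker line
def pvRevStep (st : Option String × Option String) (line : String) : Option String × Option String :=
  let tail := match st.1 with
              | none => line
              | some t => line ++ "\n" ++ t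
  let res := if PySem.Str.startswith line "event:result" then some tail else st.2
  (some tail, res)

def extract_event_result_part_alt (text : String) : String :=
  let lines := (PySem.Str.split? (PySem.Str.strip text) "\n").getD []
  let st := lines.reverse.foldl pvRevStep (none, none)
  st.2.getD ""

-- ===== PRECONDITION & SPEC =====
def Spec_extract_event_result_part (text : String) (out : String) : Prop := out = extract_event_result_part_alt text
instance (text : String) (out : String) : Decidable (Spec_extract_event_result_part text out) := by unfold Spec_extract_event_result_part; infer_instance

-- ===== CLAIM (what is proved, stated in full; the proofs are below) =====
def Claim_equal_extract_event_result_part : Prop := ∀ (text : String), Dom_extract_event_result_part text → Spec_extract_event_result_part text (extract_event_result_part text)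

-- ===== LEMMAS AND PROOFS =====

-- Str-level join steps (lifted from PySem.Chars.join_singleton / join_cons_cons / join [] = [])
lemma str_join_nil : PySem.Str.join "\n" [] = "" := by
  apply String.toList_inj.mp
  simp [PySem.Str.toList_join, PySem.Chars.join, List.intercalate]

lemma str_join_singleton (l : String) : PySem.Str.join "\n" [l] = l := by
  apply String.toList_inj.mp
  simp [PySem.Str.toList_join, PySem.Chars.join_singleton]

lemma str_join_cons_cons (l q : String) (rest : List String) :
    PySem.Str.join "\n" (l :: q :: rest) = l ++ "\n" ++ PySem.Str.join "\n" (q :: rest) := by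
  apply String.toList_inj.mp
  simp [PySem.Str.toList_join, PySem.Chars.join_cons_cons, String.toList_append]

-- A's loop: once the flag is set, every remaining line is appended
lemma capture_loop_true (ls : List String) (acc : List String) :
    ls.foldl pvCaptureStep (acc, true) = (acc ++ ls, true) := by
  induction ls generalizing acc with
  | nil => simp
  | cons l ls ih =>
    rw [List.foldl_cons, show pvCaptureStep (acc, true) l = (acc ++ [l], true) by
      simp [pvCaptureStep], ih]
    simp

-- A's loop with the flag clear collects exactly the dropWhile tail
lemma capture_loop_false (ls : List String) (acc : List String) :
    (ls.foldl pvCaptureStep (acc, false)).1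
      = acc ++ ls.dropWhile (fun l => !(PySem.Str.startswith l "event:result")) := by
  induction ls generalizing acc with
  | nil => simp
  | cons l ls ih =>
    by_cases h : PySem.Str.startswith l "event:result" = true
    all_goals simp at h
    · rw [List.foldl_cons, show pvCaptureStep (acc, false) l = (acc ++ [l], true) by
        simp [pvCaptureStep, h], capture_loop_true]
      simp [h]
    · rw [List.foldl_cons, show pvCaptureStep (acc, false) l = (acc, false) by
        simp [pvCaptureStep, h], ih]
      simp [h]

-- B's backward loop: the first state component is the whole joined tail, the second the last snapshot,
-- i.e. the joined dropWhile tail (none when there is no marker line)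
lemma rev_loop_eq (ls : List String) :
    ls.reverse.foldl pvRevStep (none, none) =
      ((match ls with | [] => none | _ => some (PySem.Str.join "\n" ls)),
       (match ls.dropWhile (fun l => !(PySem.Str.startswith l "event:result")) with
        | [] => none
        | dw => some (PySem.Str.join "\n" dw))) := by
  induction ls with
  | nil => simp
  | cons l rest ih =>
    rw [List.reverse_cons, List.foldl_append, ih]
    by_cases h : PySem.Str.startswith l "event:result" = true
    all_goals simp at h
    · cases rest with
      | nil => simp [pvRevStep, h, str_join_singleton]
      | cons q r =>
        simp only [List.foldl_cons, List.foldl_nil, pvRevStep]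
        simp [h, str_join_cons_cons]
    · cases rest with
      | nil =>
        simp [pvRevStep, h]
        exact (str_join_singleton l).symm
      | cons q r =>
        simp only [List.foldl_cons, List.foldl_nil, pvRevStep]
        simp [List.dropWhile_cons, h, str_join_cons_cons]

-- ===== VERDICT (by name: the statement is the Claim_ definition above) =====
theorem extract_event_result_part_spec : Claim_equal_extract_event_result_part := by
  intro text _
  unfold Spec_extract_event_result_part
  simp only [extract_event_result_part, extract_event_result_part_alt, rev_loop_eq,
    capture_loop_false, List.nil_append]
  cases h : (((PySem.Str.split? (PySem.Str.strip text) "\n").getD []).dropWhile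
      (fun l => !(PySem.Str.startswith l "event:result"))) with
  | nil => simp [str_join_nil]
  | cons q r => simp
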